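-- pv_equiv track=rewrite | github.com/boldprogressives/akcode | main/diff.py | get_change_extent
-- ===== SOURCE A (Python) =====
-- def get_change_extent(str1, str2):
--     """Determines the extent of differences between two strings.
--
--     Returns a pair containing the offset at which the changes start,
--     and the negative offset at which the changes end.
--
--     If the two strings have neither a common prefix nor a common
--     suffix, ``(0, 0)`` is returned.
--     """
--     start = 0
--     limit = min(len(str1), len(str2))
--     while start < limit and str1[start] == str2[start]:
--         start += 1
--     end = -1
--     limit = limit - start
--     while -end <= limit and str1[end] == str2[end]:
--         end -= 1
--     return (start, end + 1)
-- ===== SOURCE B (Python) =====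
-- def _common_prefix_len(s1, s2):
--     """Length of the common prefix of two sequences."""
--     n = 0
--     for a, b in zip(s1, s2):
--         if a != b:
--             break
--         n += 1
--     return n
--
--
-- def get_change_extent(str1, str2):
--     """Determines the extent of differences between two strings.
--
--     Returns a pair containing the offset at which the changes start,
--     and the negative offset at which the changes end.
--     """
--     start = _common_prefix_len(str1, str2)
--     suffix = _common_prefix_len(str1[start:][::-1], str2[start:][::-1])
--     return (start, -suffix)
-- ===== Notes on version B (the rewrite author's own statement) =====
-- stated objective: simpler
-- what changed: Replaces A's two index-bookkeeping while loops (with negative indexing and a shared limit variable) by a single reusable common-prefix-length helper, applied once to the strings and once to the reversed truncated tails.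
import Mathlib
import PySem

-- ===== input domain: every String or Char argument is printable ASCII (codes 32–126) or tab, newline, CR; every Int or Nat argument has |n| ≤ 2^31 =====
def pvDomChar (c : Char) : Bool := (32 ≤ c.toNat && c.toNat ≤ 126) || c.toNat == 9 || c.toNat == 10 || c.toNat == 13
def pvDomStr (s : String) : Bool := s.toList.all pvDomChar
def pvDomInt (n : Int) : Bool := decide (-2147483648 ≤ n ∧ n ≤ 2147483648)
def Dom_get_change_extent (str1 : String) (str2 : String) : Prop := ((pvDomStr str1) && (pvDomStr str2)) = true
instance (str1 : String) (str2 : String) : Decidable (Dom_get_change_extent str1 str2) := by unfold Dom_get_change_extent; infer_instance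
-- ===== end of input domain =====

-- B replaces A's two index-bookkeeping while loops (negative indexing, shared limit)
-- by one reusable common-prefix-length helper applied to the strings and to the
-- reversed truncated tails; objective: simpler.

-- ===== PORT A =====
-- first while loop: while start < limit and str1[start] == str2[start]: start += 1
def aLoop1 (str1 str2 : String) (limit : Int) (start : Int) : Int :=
  if h : start < limit ∧ PySem.Str.pyGet? str1 start = PySem.Str.pyGet? str2 start then
    aLoop1 str1 str2 limit (start + 1)
  else start
termination_by (limit - start).toNat
decreasing_by omega

-- second while loop: while -end <= limit and str1[end] == str2[end]: end -= 1
def aLoop2 (str1 str2 : String) (limit : Int) (e : Int) : Int :=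
  if h : -e ≤ limit ∧ PySem.Str.pyGet? str1 e = PySem.Str.pyGet? str2 e then
    aLoop2 str1 str2 limit (e - 1)
  else e
termination_by (limit + e + 1).toNat
decreasing_by omega

def get_change_extent (str1 : String) (str2 : String) : Int × Int :=
  let limit := min (PySem.Str.len str1) (PySem.Str.len str2)
  let start := aLoop1 str1 str2 limit 0
  let e := aLoop2 str1 str2 (limit - start) (-1)
  (start, e + 1)

-- ===== PORT B =====
-- _common_prefix_len: count equal leading pairs of zip(s1, s2)
def cpLen : List Char → List Char → Nat
  | a :: as, b :: bs => if a = b then cpLen as bs + 1 else 0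
  | _, _ => 0

def get_change_extent_alt (str1 : String) (str2 : String) : Int × Int :=
  let start := cpLen str1.toList str2.toList
  let suffix := cpLen ((str1.toList.drop start).reverse) ((str2.toList.drop start).reverse)
  ((start : Int), -(suffix : Int))

-- ===== PRECONDITION & SPEC =====
def Spec_get_change_extent (str1 : String) (str2 : String) (out : Int × Int) : Prop := out = get_change_extent_alt str1 str2
instance (str1 : String) (str2 : String) (out : Int × Int) : Decidable (Spec_get_change_extent str1 str2 out) := by unfold Spec_get_change_extent; infer_instance

-- ===== CLAIM (what is proved, stated in full; the proofs are below) =====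
def Claim_equal_get_change_extent : Prop := ∀ (str1 : String) (str2 : String), Dom_get_change_extent str1 str2 → Spec_get_change_extent str1 str2 (get_change_extent str1 str2)

-- ===== LEMMAS AND PROOFS =====

lemma cpLen_le (a b : List Char) : cpLen a b ≤ min a.length b.length := by
  induction a generalizing b with
  | nil => simp [cpLen]
  | cons x as ih =>
    cases b with
    | nil => simp [cpLen]
    | cons y bs =>
      simp only [cpLen]
      split_ifs
      · have := ih bs; simp [List.length_cons]; omega
      · omega

lemma cpLen_take (a b : List Char) (m n : Nat) :
    cpLen (a.take m) (b.take n) = min (min m n) (cpLen a b) := by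
  induction a generalizing b m n with
  | nil => simp [cpLen]
  | cons x as ih =>
    cases b with
    | nil => cases m <;> simp [cpLen]
    | cons y bs =>
      cases m with
      | zero => simp [cpLen]
      | succ m =>
        cases n with
        | zero => simp [cpLen]
        | succ n =>
          simp only [List.take_succ_cons, cpLen]
          split_ifs
          · rw [ih]; omega
          · simp

lemma aLoop1_eq (s1 s2 : String) (lim j : Nat)
    (hl : lim ≤ min s1.toList.length s2.toList.length) (hj : j ≤ lim) :
    aLoop1 s1 s2 (lim : Int) (j : Int) =
      ((min lim (j + cpLen (s1.toList.drop j) (s2.toList.drop j)) : Nat) : Int) := by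
  have hfuel : lim - j = lim - j := rfl
  generalize hf : lim - j = fuel at hfuel
  clear hfuel
  induction fuel generalizing j with
  | zero =>
    have hjl : j = lim := by omega
    rw [aLoop1]
    rw [dif_neg]
    · omega
    · rintro ⟨h, -⟩; omega
  | succ fuel ih =>
    have hjlt : j < lim := by omega
    have h1 : j < s1.toList.length := by omega
    have h2 : j < s2.toList.length := by omega
    rw [aLoop1]
    have hg1 : PySem.Str.pyGet? s1 (j : Int) = s1.toList[j]? := by
      simp [PySem.Str.pyGet?]
    have hg2 : PySem.Str.pyGet? s2 (j : Int) = s2.toList[j]? := by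
      simp [PySem.Str.pyGet?]
    have hd1 : s1.toList.drop j = s1.toList[j] :: s1.toList.drop (j + 1) :=
      (List.getElem_cons_drop h1).symm
    have hd2 : s2.toList.drop j = s2.toList[j] :: s2.toList.drop (j + 1) :=
      (List.getElem_cons_drop h2).symm
    by_cases heq : s1.toList[j] = s2.toList[j]
    · have hcond : (j : Int) < (lim : Int) ∧ PySem.Str.pyGet? s1 (j : Int) = PySem.Str.pyGet? s2 (j : Int) := by
        refine ⟨by exact_mod_cast hjlt, ?_⟩
        rw [hg1, hg2, List.getElem?_eq_getElem h1, List.getElem?_eq_getElem h2, heq]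
      rw [dif_pos hcond]
      have : (j : Int) + 1 = ((j + 1 : Nat) : Int) := by push_cast; ring
      rw [this, ih (j + 1) (by omega) (by omega)]
      rw [hd1, hd2]
      simp only [cpLen, if_pos heq]
      congr 1; omega
    · have hcond : ¬ ((j : Int) < (lim : Int) ∧ PySem.Str.pyGet? s1 (j : Int) = PySem.Str.pyGet? s2 (j : Int)) := by
        rintro ⟨-, hc⟩
        rw [hg1, hg2, List.getElem?_eq_getElem h1, List.getElem?_eq_getElem h2] at hc
        exact heq (Option.some_injective _ hc)
      rw [dif_neg hcond]
      rw [hd1, hd2]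
      simp only [cpLen, if_neg heq]
      congr 1; omega

lemma aLoop2_eq (s1 s2 : String) (lim j : Nat)
    (hl : lim ≤ min s1.toList.length s2.toList.length) (hj : j ≤ lim) :
    aLoop2 s1 s2 (lim : Int) (-(j : Int) - 1) =
      -((min lim (j + cpLen (s1.toList.reverse.drop j) (s2.toList.reverse.drop j)) : Nat) : Int) - 1 := by
  have hfuel : lim - j = lim - j := rfl
  generalize hf : lim - j = fuel at hfuel
  clear hfuel
  induction fuel generalizing j with
  | zero =>
    have hjl : j = lim := by omega
    rw [aLoop2]
    rw [dif_neg]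
    · omega
    · rintro ⟨h, -⟩; omega
  | succ fuel ih =>
    have hjlt : j < lim := by omega
    have h1 : j < s1.toList.length := by omega
    have h2 : j < s2.toList.length := by omega
    have hr1 : j < s1.toList.reverse.length := by simpa using h1
    have hr2 : j < s2.toList.reverse.length := by simpa using h2
    rw [aLoop2]
    have hidx : -(j : Int) - 1 = -(((j + 1 : Nat) : Int)) := by push_cast; ring
    have hb1 : PySem.Str.pyGet? s1 (-(j : Int) - 1) = PySem.List.pyGet? s1.toList (-(j : Int) - 1) := by
      simp [PySem.Str.pyGet?]
    have hg1 : PySem.Str.pyGet? s1 (-(j : Int) - 1) = some (s1.toList.reverse[j]) := by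
      rw [hb1, hidx]
      rw [PySem.List.pyGet?_neg_natCast (xs := s1.toList) (k := j + 1) (by omega) (by omega)]
      rw [show s1.toList.length - (j + 1) = s1.toList.length - 1 - j from by omega]
      rw [← List.getElem?_reverse (by omega)]
      rw [List.getElem?_eq_getElem (by omega)]
    have hb2 : PySem.Str.pyGet? s2 (-(j : Int) - 1) = PySem.List.pyGet? s2.toList (-(j : Int) - 1) := by
      simp [PySem.Str.pyGet?]
    have hg2 : PySem.Str.pyGet? s2 (-(j : Int) - 1) = some (s2.toList.reverse[j]) := by
      rw [hb2, hidx]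
      rw [PySem.List.pyGet?_neg_natCast (xs := s2.toList) (k := j + 1) (by omega) (by omega)]
      rw [show s2.toList.length - (j + 1) = s2.toList.length - 1 - j from by omega]
      rw [← List.getElem?_reverse (by omega)]
      rw [List.getElem?_eq_getElem (by omega)]
    have hd1 : s1.toList.reverse.drop j = s1.toList.reverse[j] :: s1.toList.reverse.drop (j + 1) :=
      (List.getElem_cons_drop hr1).symm
    have hd2 : s2.toList.reverse.drop j = s2.toList.reverse[j] :: s2.toList.reverse.drop (j + 1) :=
      (List.getElem_cons_drop hr2).symm
    by_cases heq : s1.toList.reverse[j] = s2.toList.reverse[j]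
    · have hcond : -(-(j : Int) - 1) ≤ (lim : Int) ∧ PySem.Str.pyGet? s1 (-(j : Int) - 1) = PySem.Str.pyGet? s2 (-(j : Int) - 1) := by
        refine ⟨by omega, by rw [hg1, hg2, heq]⟩
      rw [dif_pos hcond]
      have hstep : -(j : Int) - 1 - 1 = -((j + 1 : Nat) : Int) - 1 := by push_cast; ring
      rw [hstep, ih (j + 1) (by omega) (by omega)]
      rw [hd1, hd2]
      simp only [cpLen, if_pos heq]
      have : min lim (j + (cpLen (s1.toList.reverse.drop (j + 1)) (s2.toList.reverse.drop (j + 1)) + 1))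
           = min lim (j + 1 + cpLen (s1.toList.reverse.drop (j + 1)) (s2.toList.reverse.drop (j + 1))) := by omega
      rw [this]
    · have hcond : ¬ (-(-(j : Int) - 1) ≤ (lim : Int) ∧ PySem.Str.pyGet? s1 (-(j : Int) - 1) = PySem.Str.pyGet? s2 (-(j : Int) - 1)) := by
        rintro ⟨-, hc⟩
        rw [hg1, hg2] at hc
        exact heq (Option.some_injective _ hc)
      rw [dif_neg hcond]
      rw [hd1, hd2]
      simp only [cpLen, if_neg heq]
      congr 1
      omega

-- ===== VERDICT (by name: the statement is the Claim_ definition above) =====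
theorem get_change_extent_spec : Claim_equal_get_change_extent := by
  intro s1 s2 _
  unfold Spec_get_change_extent
  have hcle : cpLen s1.toList s2.toList ≤ min s1.toList.length s2.toList.length :=
    cpLen_le s1.toList s2.toList
  have hlen1 : PySem.Str.len s1 = (s1.toList.length : Int) := by simp [PySem.Str.len_eq]
  have hlen2 : PySem.Str.len s2 = (s2.toList.length : Int) := by simp [PySem.Str.len_eq]
  simp only [get_change_extent, get_change_extent_alt, hlen1, hlen2]
  rw [show min ((s1.toList.length : Int)) ((s2.toList.length : Int))
        = ((min s1.toList.length s2.toList.length : Nat) : Int) from by omega]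
  have hstart := aLoop1_eq s1 s2 (min s1.toList.length s2.toList.length) 0 le_rfl (Nat.zero_le _)
  simp only [List.drop_zero, Nat.zero_add, Nat.cast_zero] at hstart
  rw [show min (min s1.toList.length s2.toList.length) (cpLen s1.toList s2.toList)
        = cpLen s1.toList s2.toList from by omega] at hstart
  rw [hstart]
  rw [show ((min s1.toList.length s2.toList.length : Nat) : Int) - ((cpLen s1.toList s2.toList : Nat) : Int)
        = ((min s1.toList.length s2.toList.length - cpLen s1.toList s2.toList : Nat) : Int) from by omega]
  have h2 := aLoop2_eq s1 s2 (min s1.toList.length s2.toList.length - cpLen s1.toList s2.toList) 0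
      (by omega) (Nat.zero_le _)
  simp only [List.drop_zero, Nat.zero_add, Nat.cast_zero, neg_zero, zero_sub] at h2
  rw [h2]
  rw [show cpLen ((s1.toList.drop (cpLen s1.toList s2.toList)).reverse)
            ((s2.toList.drop (cpLen s1.toList s2.toList)).reverse)
        = min (min s1.toList.length s2.toList.length - cpLen s1.toList s2.toList)
            (cpLen s1.toList.reverse s2.toList.reverse) from by
      rw [List.reverse_drop, List.reverse_drop, cpLen_take]; omega]
  rw [Prod.mk.injEq]
  exact ⟨rfl, by omega⟩
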